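-- pv_equiv track=rewrite | github.com/shalomb/tpcli-pi-tools | tpcli_pi/core/change_tracker.py | _split_diff_sections
-- ===== SOURCE A (Python) =====
-- from typing import Any, Optional, List, Dict
--
-- def _split_diff_sections(lines: List[str]) -> List[List[str]]:
--     """Split diff into sections marked by @@ lines."""
--     sections = []
--     current_section = []
--
--     for line in lines:
--         if line.startswith('@@'):
--             if current_section:
--                 sections.append(current_section)
--             current_section = [line]
--         else:
--             current_section.append(line)
--
--     if current_section:
--         sections.append(current_section)
--
--     return sections
-- ===== SOURCE B (Python) =====
-- def _split_diff_sections(lines):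
--     """Split diff into sections marked by @@ lines (single reverse pass)."""
--     out = []  # sections, newest last; each section built back-to-front
--     for line in reversed(lines):
--         if out and not out[-1][-1].startswith('@@'):
--             out[-1].append(line)
--         else:
--             out.append([line])
--     out.reverse()
--     for s in out:
--         s.reverse()
--     return out
-- ===== Notes on version B (the rewrite author's own statement) =====
-- stated objective: alternative
-- what changed: B builds the sections in a single reverse pass (a right fold): each line is either prepended to the first already-built section (when that section does not start with an @@ marker) or opens a new section, so A's flush-the-accumulator logic and final flush disappear.
import Mathlib
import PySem

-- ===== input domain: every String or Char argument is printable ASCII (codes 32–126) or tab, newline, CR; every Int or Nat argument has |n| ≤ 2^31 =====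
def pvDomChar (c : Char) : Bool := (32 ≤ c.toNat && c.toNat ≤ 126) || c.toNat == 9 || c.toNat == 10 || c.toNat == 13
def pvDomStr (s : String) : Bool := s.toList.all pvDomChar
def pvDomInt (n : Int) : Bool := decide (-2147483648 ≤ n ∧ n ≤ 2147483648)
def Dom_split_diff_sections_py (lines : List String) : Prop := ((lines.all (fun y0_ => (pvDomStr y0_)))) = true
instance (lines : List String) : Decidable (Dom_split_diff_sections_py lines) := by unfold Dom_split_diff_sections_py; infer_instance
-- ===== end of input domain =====

-- B replaces A's forward accumulate-and-flush loop by a single reverse pass that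
-- prepends each line to the first built section or opens a new one; same O(n) cost.

-- ===== PORT A =====
-- one loop step of A: flush current section on an '@@' line, else append to it
def stepA (st : List (List String) × List String) (line : String) :
    List (List String) × List String :=
  if PySem.Str.startswith line "@@" then
    ((if st.2.isEmpty then st.1 else st.1 ++ [st.2]), [line])
  else
    (st.1, st.2 ++ [line])

def split_diff_sections_py (lines : List String) : List (List String) :=
  let st := lines.foldl stepA ([], [])
  if st.2.isEmpty then st.1 else st.1 ++ [st.2]

-- ===== PORT B =====
-- one reverse-pass step of B: append the line to the last section when that section's
-- back-to-front head (its last element) is not an '@@' marker, else open a new section;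
-- the inner 'none' case (an empty section) is unreachable in Python and returns the natural value
def stepB (out : List (List String)) (line : String) : List (List String) :=
  match out.getLast? with
  | some sec =>
      match sec.getLast? with
      | some h =>
          if ¬ PySem.Str.startswith h "@@" then out.dropLast ++ [sec ++ [line]]
          else out ++ [[line]]
      | none => out ++ [[line]]
  | none => out ++ [[line]]

-- Python's 'for line in reversed(lines)' = foldl over lines.reverse; then out.reverse()
-- and reversing each section in place
def split_diff_sections_py_alt (lines : List String) : List (List String) :=
  let out := lines.reverse.foldl stepB []
  out.reverse.map List.reverse

-- ===== PRECONDITION & SPEC =====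
def Spec_split_diff_sections_py (lines : List String) (out : List (List String)) : Prop := out = split_diff_sections_py_alt lines
instance (lines : List String) (out : List (List String)) : Decidable (Spec_split_diff_sections_py lines out) := by unfold Spec_split_diff_sections_py; infer_instance

-- ===== CLAIM (what is proved, stated in full; the proofs are below) =====
def Claim_equal_split_diff_sections_py : Prop := ∀ (lines : List String), Dom_split_diff_sections_py lines → Spec_split_diff_sections_py lines (split_diff_sections_py lines)

-- ===== LEMMAS AND PROOFS =====

-- proof-side mirror of stepB: same decision, taken on cons-lists built front-to-back
-- (acc = (out.reverse).map List.reverse at every step)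
def altStep (line : String) (acc : List (List String)) : List (List String) :=
  match acc with
  | (h :: t) :: rest =>
      if ¬ PySem.Str.startswith h "@@" then (line :: h :: t) :: rest
      else [line] :: acc
  | _ => [line] :: acc

lemma stepB_ne_nil (out : List (List String)) (line : String)
    (hne : ∀ s ∈ out, s ≠ []) : ∀ s ∈ stepB out line, s ≠ [] := by
  intro s hs
  have key : ∀ (X : List (List String)) (y : List String),
      X ⊆ out → y ≠ [] → s ∈ X ++ [y] → s ≠ [] := by
    intro X y hX hy hsm
    rcases List.mem_append.1 hsm with h1 | h1
    · exact hne s (hX h1)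
    · simp at h1; exact h1 ▸ hy
  unfold stepB at hs
  split at hs
  · split at hs
    · split at hs
      · exact key _ _ (List.dropLast_sublist _).subset (by simp) hs
      · exact key _ _ (fun _ a => a) (by simp) hs
    · exact key _ _ (fun _ a => a) (by simp) hs
  · exact key _ _ (fun _ a => a) (by simp) hs

lemma M_stepB (out : List (List String)) (line : String)
    (hne : ∀ s ∈ out, s ≠ []) :
    (stepB out line).reverse.map List.reverse
      = altStep line (out.reverse.map List.reverse) := by
  rcases out.eq_nil_or_concat with rfl | ⟨init, sec, rfl⟩
  · simp [stepB, altStep]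
  · have hsec : sec ≠ [] := hne sec (by simp)
    rcases sec.eq_nil_or_concat with rfl | ⟨a, h, rfl⟩
    · exact absurd rfl hsec
    · by_cases hm : PySem.Str.startswith h "@@" = true
      · have hmc : PySem.Chars.startswith h.toList ['@', '@'] = true := by simpa using hm
        simp [stepB, altStep, hmc]
      · have hmc : PySem.Chars.startswith h.toList ['@', '@'] = false := by simpa using hm
        simp [stepB, altStep, hmc]

lemma foldl_stepB_M (ls : List String) (out : List (List String))
    (hne : ∀ s ∈ out, s ≠ []) :
    (ls.foldl stepB out).reverse.map List.reverse
      = ls.foldl (fun acc l => altStep l acc) (out.reverse.map List.reverse) := by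
  induction ls generalizing out with
  | nil => simp
  | cons l ls ih =>
    simp only [List.foldl_cons]
    rw [ih (stepB out l) (stepB_ne_nil out l hne), M_stepB out l hne]

lemma alt_eq_foldr (lines : List String) :
    split_diff_sections_py_alt lines = lines.foldr altStep [] := by
  unfold split_diff_sections_py_alt
  rw [foldl_stepB_M lines.reverse [] (by simp)]
  simp [List.foldl_reverse]

-- how A's pending current section 'cur' combines with the sections B builds for the remaining lines
def merge (cur : List String) (secs : List (List String)) : List (List String) :=
  if cur.isEmpty then secs else
  match secs with
  | [] => [cur]
  | (h :: t) :: rest =>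
      if PySem.Str.startswith h "@@" then cur :: secs else (cur ++ h :: t) :: rest
  | [] :: rest => cur :: [] :: rest  -- unreachable: B's sections are never empty

lemma alt_mem_ne_nil (ls : List String) (s : List String)
    (hs : s ∈ ls.foldr altStep []) : s ≠ [] := by
  induction ls generalizing s with
  | nil => simp at hs
  | cons l ls ih =>
    simp only [List.foldr_cons] at hs
    rcases hfold : ls.foldr altStep [] with _ | ⟨sec, rest⟩
    · rw [hfold] at hs; simp [altStep] at hs; simp [hs]
    · rcases sec with _ | ⟨h, t⟩
      · exact absurd rfl (ih [] (by rw [hfold]; exact List.mem_cons_self))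
      · rw [hfold] at hs
        by_cases hmk : PySem.Chars.startswith h.toList ['@', '@'] = true
        · simp [altStep, hmk] at hs
          rcases hs with h1 | h1 | h1
          · simp [h1]
          · exact ih s (by rw [hfold, h1]; exact List.mem_cons_self)
          · exact ih s (by rw [hfold]; exact List.mem_cons_of_mem _ h1)
        · simp [altStep, hmk] at hs
          rcases hs with h1 | h1
          · simp [h1]
          · exact ih s (by rw [hfold]; exact List.mem_cons_of_mem _ h1)

lemma altStep_head (l : String) (bs : List (List String)) :
    ∃ t rest, altStep l bs = (l :: t) :: rest := by
  unfold altStep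
  rcases bs with _ | ⟨_ | ⟨h, t⟩, rest⟩
  · exact ⟨[], [], rfl⟩
  · exact ⟨[], [] :: rest, rfl⟩
  · by_cases hh : PySem.Str.startswith h "@@" = true
    · exact ⟨[], (h :: t) :: rest, by simp only [hh]; rfl⟩
    · exact ⟨h :: t, rest, by simp only [hh]; rfl⟩

lemma merge_single (l : String) (bs : List (List String))
    (hne : ∀ s ∈ bs, s ≠ []) : merge [l] bs = altStep l bs := by
  unfold merge altStep
  rcases bs with _ | ⟨_ | ⟨h, t⟩, rest⟩
  · rfl
  · exact absurd rfl (hne [] List.mem_cons_self)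
  · by_cases hh : PySem.Str.startswith h "@@" = true
    · simp only [hh]; rfl
    · simp only [hh]; rfl

lemma merge_marker' (cur : List String) (l : String) (bs : List (List String))
    (hm : PySem.Str.startswith l "@@" = true) :
    merge cur (altStep l bs) = (if cur.isEmpty then [] else [cur]) ++ altStep l bs := by
  obtain ⟨t, rest, hh⟩ := altStep_head l bs
  have hmc : PySem.Chars.startswith l.toList ['@', '@'] = true := by simpa using hm
  rw [hh]
  rcases cur with _ | ⟨c, cs⟩
  · simp [merge]
  · simp [merge, hmc]

lemma merge_nonmarker (cur : List String) (l : String) (bs : List (List String))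
    (hm : PySem.Str.startswith l "@@" = false)
    (hne : ∀ s ∈ bs, s ≠ []) :
    merge (cur ++ [l]) bs = merge cur (altStep l bs) := by
  have hmc : PySem.Chars.startswith l.toList ['@', '@'] = false := by simpa using hm
  rcases bs with _ | ⟨_ | ⟨h, t⟩, rest⟩
  · rcases cur with _ | ⟨c, cs⟩ <;> simp [merge, altStep, hmc]
  · exact absurd rfl (hne [] List.mem_cons_self)
  · by_cases hh : PySem.Str.startswith h "@@" = true
    · have ha : altStep l ((h :: t) :: rest) = [l] :: (h :: t) :: rest := by
        unfold altStep; simp only [hh]; rfl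
      have hhc : PySem.Chars.startswith h.toList ['@', '@'] = true := by simpa using hh
      rw [ha]
      rcases cur with _ | ⟨c, cs⟩ <;> simp [merge, hhc, hmc]
    · have ha : altStep l ((h :: t) :: rest) = (l :: h :: t) :: rest := by
        unfold altStep; simp only [hh]; rfl
      have hhc : PySem.Chars.startswith h.toList ['@', '@'] = false := by simpa using hh
      rw [ha]
      rcases cur with _ | ⟨c, cs⟩ <;> simp [merge, hhc, hmc]

lemma loop_merge (ls : List String) (secs : List (List String)) (cur : List String) :
    (let st := ls.foldl stepA (secs, cur);
     if st.2.isEmpty then st.1 else st.1 ++ [st.2])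
    = secs ++ merge cur (ls.foldr altStep []) := by
  induction ls generalizing secs cur with
  | nil =>
    simp only [List.foldl_nil, List.foldr_nil, merge]
    cases cur <;> simp
  | cons l ls ih =>
    simp only [List.foldl_cons, List.foldr_cons]
    by_cases hm : PySem.Str.startswith l "@@" = true
    · have hstep : stepA (secs, cur) l = ((if cur.isEmpty then secs else secs ++ [cur]), [l]) := by
        unfold stepA; simp only [hm]; rfl
      rw [hstep, ih, merge_single l _ (alt_mem_ne_nil ls), merge_marker' cur l _ hm]
      rcases cur with _ | ⟨c, cs⟩ <;> simp
    · have hstep : stepA (secs, cur) l = (secs, cur ++ [l]) := by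
        unfold stepA; simp only [hm]; rfl
      rw [hstep, ih, merge_nonmarker cur l _ (by simpa using hm) (alt_mem_ne_nil ls)]

-- ===== VERDICT (by name: the statement is the Claim_ definition above) =====
theorem split_diff_sections_py_spec : Claim_equal_split_diff_sections_py := by
  intro lines _
  unfold Spec_split_diff_sections_py split_diff_sections_py
  rw [alt_eq_foldr, loop_merge]
  simp [merge]
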